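-- pv_equiv track=rewrite | github.com/NBMueller/SCcaller | sccaller_v2.0.0.py | get_reference_variant_allele_num
-- ===== SOURCE A (Python) =====
-- def get_reference_variant_allele_num(read_base):
--     v_num = 0
--     r_num = 0
--     for i, base in enumerate(read_base):
--         if base in [".", ","]:
--             r_num += 1
--         if base in ["A", "T", "C", "G"]:
--             v_num += 1
--         if i > 0 and base in ["I", "i"] and read_base[i - 1] in [".", ","]:
--             r_num -= 1
--             v_num += 1
--     return [r_num, v_num]
-- ===== SOURCE B (Python) =====
-- def get_reference_variant_allele_num(read_base):
--     bases = list(read_base)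
--     ref = bases.count('.') + bases.count(',')
--     var = sum(bases.count(c) for c in 'ATCG')
--     adj = sum(1 for prev, cur in zip(bases, bases[1:])
--               if cur in ('I', 'i') and prev in ('.', ','))
--     return [ref - adj, var + adj]
-- ===== Notes on version B (the rewrite author's own statement) =====
-- stated objective: simpler
-- what changed: Replaces the single stateful loop that tallies and corrects per position with independent bulk count() scans for reference and variant bases plus one zip-over-adjacent-pairs pass for the insertion correction.
import Mathlib
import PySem

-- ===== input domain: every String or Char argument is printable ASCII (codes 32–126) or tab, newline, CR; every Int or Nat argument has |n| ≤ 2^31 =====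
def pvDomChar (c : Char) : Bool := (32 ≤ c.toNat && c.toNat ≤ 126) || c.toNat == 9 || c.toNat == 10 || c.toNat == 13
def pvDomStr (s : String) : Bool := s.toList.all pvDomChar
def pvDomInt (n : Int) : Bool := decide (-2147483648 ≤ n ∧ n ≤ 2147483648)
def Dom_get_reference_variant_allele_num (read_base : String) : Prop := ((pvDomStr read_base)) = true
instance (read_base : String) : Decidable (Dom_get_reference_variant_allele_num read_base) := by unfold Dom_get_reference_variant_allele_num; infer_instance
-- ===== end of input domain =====

-- B replaces A's single stateful tallying-and-correcting loop by independent bulk count scans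
-- plus one adjacent-pairs pass for the insertion correction (objective: simpler).


-- ===== PORT A =====
-- loop body of A: state is (v_num, r_num); read_base[i-1] is always in range when i > 0
-- (short-circuit of the 'and'), so pyGetD with a dummy default is exact there
def pvStepA (l : List Char) (p : Int × Int) (ib : Int × Char) : Int × Int :=
  let rn : Int := if ib.2 ∈ (['.', ','] : List Char) then p.2 + 1 else p.2
  let vn : Int := if ib.2 ∈ (['A', 'T', 'C', 'G'] : List Char) then p.1 + 1 else p.1
  if ib.1 > 0 ∧ ib.2 ∈ (['I', 'i'] : List Char) ∧
      PySem.List.pyGetD l (ib.1 - 1) ' ' ∈ (['.', ','] : List Char)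
  then (vn + 1, rn - 1) else (vn, rn)

def get_reference_variant_allele_num (read_base : String) : List Int :=
  let l := read_base.toList
  let st := (PySem.List.enumerate l 0).foldl (pvStepA l) (0, 0)
  [st.2, st.1]

-- ===== PORT B =====
-- predicate of B's correction pass: cur in ('I','i') and prev in ('.',',')
def pvAdjP (pc : Char × Char) : Bool :=
  (pc.2 == 'I' || pc.2 == 'i') && (pc.1 == '.' || pc.1 == ',')

def get_reference_variant_allele_num_alt (read_base : String) : List Int :=
  let bases := read_base.toList
  let ref : Int := (bases.count '.' : Int) + (bases.count ',' : Int)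
  let var : Int := ((['A', 'T', 'C', 'G'] : List Char).map (fun c => (bases.count c : Int))).sum
  let adj : Int := ((bases.zip (bases.drop 1)).countP pvAdjP : Nat)
  [ref - adj, var + adj]

-- ===== PRECONDITION & SPEC =====
def Spec_get_reference_variant_allele_num (read_base : String) (out : List Int) : Prop := out = get_reference_variant_allele_num_alt read_base
instance (read_base : String) (out : List Int) : Decidable (Spec_get_reference_variant_allele_num read_base out) := by unfold Spec_get_reference_variant_allele_num; infer_instance

-- ===== CLAIM (what is proved, stated in full; the proofs are below) =====
def Claim_equal_get_reference_variant_allele_num : Prop := ∀ (read_base : String), Dom_get_reference_variant_allele_num read_base → Spec_get_reference_variant_allele_num read_base (get_reference_variant_allele_num read_base)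

-- ===== LEMMAS AND PROOFS =====

-- proof-side names for B's three tallies
def pvRefC (l : List Char) : Int := (l.count '.' : Int) + (l.count ',' : Int)
def pvVarC (l : List Char) : Int := ((['A', 'T', 'C', 'G'] : List Char).map (fun c => (l.count c : Int))).sum
def pvAdjC (l : List Char) : Int := ((l.zip (l.drop 1)).countP pvAdjP : Nat)

lemma pvZipSnoc (l : List Char) (a : Char) :
    (l ++ [a]).zip ((l ++ [a]).drop 1) =
      l.zip (l.drop 1) ++ (match l.getLast? with | none => [] | some p => [(p, a)]) := by
  induction l with
  | nil => simp
  | cons x t ih =>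
      cases t with
      | nil => simp
      | cons y u =>
          simp only [List.cons_append, List.drop_succ_cons, List.drop_zero,
            List.zip_cons_cons, List.getLast?_cons_cons] at ih ⊢
          rw [ih]

lemma pvAdjSnoc (l : List Char) (a : Char) :
    pvAdjC (l ++ [a]) =
      pvAdjC l + (match l.getLast? with
                  | none => 0
                  | some p => if pvAdjP (p, a) then (1 : Int) else 0) := by
  unfold pvAdjC
  rw [pvZipSnoc]
  cases h : l.getLast? with
  | none => simp
  | some p => simp only [List.countP_append, List.countP_cons, List.countP_nil]
              split <;> push_cast <;> ring

lemma pvRefSnoc (l : List Char) (a : Char) :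
    pvRefC (l ++ [a]) = pvRefC l + (if a ∈ (['.', ','] : List Char) then (1 : Int) else 0) := by
  simp only [pvRefC, List.count_append, List.count_singleton, List.mem_cons,
    List.not_mem_nil, or_false]
  push_cast
  split_ifs <;> simp_all <;> omega

lemma pvVarSnoc (l : List Char) (a : Char) :
    pvVarC (l ++ [a]) = pvVarC l + (if a ∈ (['A', 'T', 'C', 'G'] : List Char) then (1 : Int) else 0) := by
  simp only [pvVarC, List.count_append, List.count_singleton, List.map_cons, List.map_nil,
    List.sum_cons, List.sum_nil, List.mem_cons, List.not_mem_nil, or_false]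
  push_cast
  split_ifs <;> simp_all <;> omega

-- fold over enumerate l ignores the extra last element of the indexed list
lemma pvCongr (l : List Char) (a : Char) (init : Int × Int) :
    (PySem.List.enumerate l 0).foldl (pvStepA (l ++ [a])) init =
    (PySem.List.enumerate l 0).foldl (pvStepA l) init := by
  apply PySem.List.foldl_congr_mem
  intro acc x hx
  rw [PySem.List.mem_enumerate_iff] at hx
  obtain ⟨k, hk, rfl⟩ := hx
  unfold pvStepA
  simp only [zero_add]
  rcases Nat.eq_zero_or_pos k with hk0 | hk0
  · subst hk0; simp
  · have h1 : ((k : Int) - 1) = ((k - 1 : Nat) : Int) := by omega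
    rw [h1, PySem.List.pyGetD_natCast, PySem.List.pyGetD_natCast,
        List.getD_eq_getElem?_getD, List.getD_eq_getElem?_getD,
        List.getElem?_append_left (by omega)]

-- the effect of A's last loop iteration, on a nonempty prefix x :: t
lemma pvStepLast (a : Char) (V R C : Int) (x : Char) (t : List Char)
    (adjval : Int)
    (hadj : adjval = (if pvAdjP ((x :: t).getLast (by simp), a) then (1 : Int) else 0)) :
    pvStepA ((x :: t) ++ [a]) (V + C, R - C) ((0 + ((x :: t).length : Int)), a) =
      ((V + if a ∈ (['A', 'T', 'C', 'G'] : List Char) then (1 : Int) else 0) + (C + adjval),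
       (R + if a ∈ (['.', ','] : List Char) then (1 : Int) else 0) - (C + adjval)) := by
  set l := x :: t with hl
  have hne : l ≠ [] := by simp [hl]
  have hidx : (0 + (l.length : Int)) - 1 = ((l.length - 1 : Nat) : Int) := by simp [hl]
  have hget : PySem.List.pyGetD (l ++ [a]) ((0 + (l.length : Int)) - 1) ' ' = l.getLast hne := by
    rw [hidx, PySem.List.pyGetD_natCast, List.getD_eq_getElem?_getD,
        List.getElem?_append_left (by simp [hl]), ← List.getLast?_eq_getElem?,
        List.getLast?_eq_some_getLast hne]
    rfl
  unfold pvStepA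
  simp only [hget, hadj, pvAdjP]
  set g := l.getLast hne with hgdef
  by_cases hI : a = 'I' ∨ a = 'i'
  · by_cases hg : g = '.' ∨ g = ','
    · rcases hI with rfl | rfl <;> rcases hg with hg | hg <;>
        simp [hg, hl, Prod.mk.injEq] <;> omega
    · have h1 : ¬ (g = '.') := fun h => hg (Or.inl h)
      have h2 : ¬ (g = ',') := fun h => hg (Or.inr h)
      rcases hI with rfl | rfl <;> simp [h1, h2, hl]
  · have h1 : ¬ (a = 'I') := fun h => hI (Or.inl h)
    have h2 : ¬ (a = 'i') := fun h => hI (Or.inr h)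
    simp only [List.mem_cons, List.not_mem_nil, or_false]
    rw [if_neg (by tauto)]
    split_ifs with hA hB <;> simp_all [Prod.mk.injEq] <;> omega

-- loop invariant result: A's fold computes B's three tallies
lemma pvMain (l : List Char) :
    (PySem.List.enumerate l 0).foldl (pvStepA l) (0, 0) =
      (pvVarC l + pvAdjC l, pvRefC l - pvAdjC l) := by
  induction l using List.reverseRecOn with
  | nil => simp [pvVarC, pvRefC, pvAdjC, PySem.List.enumerate_nil]
  | append_singleton l a ih =>
      rw [PySem.List.enumerate_append, List.foldl_append, pvCongr, ih]
      simp only [PySem.List.enumerate_cons, PySem.List.enumerate_nil, List.foldl_cons,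
        List.foldl_nil]
      rw [pvRefSnoc, pvVarSnoc, pvAdjSnoc]
      cases l with
      | nil =>
          simp only [pvVarC, pvRefC, pvAdjC, List.getLast?_nil]
          unfold pvStepA
          simp
      | cons x t =>
          rw [List.getLast?_eq_some_getLast (l := x :: t) (by simp)]
          exact pvStepLast a _ _ _ x t _ rfl

-- ===== VERDICT (by name: the statement is the Claim_ definition above) =====
theorem get_reference_variant_allele_num_spec : Claim_equal_get_reference_variant_allele_num := by
  intro s _
  unfold Spec_get_reference_variant_allele_num get_reference_variant_allele_num
    get_reference_variant_allele_num_alt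
  dsimp only
  rw [pvMain s.toList]
  simp only [pvVarC, pvRefC, pvAdjC]
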